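-- pv_equiv track=rewrite | github.com/JVYazbek/C-digos-Python | ATT02/Exercicio01.py | classificar_pontos
-- ===== SOURCE A (Python) =====
-- def vizinhos(matriz, i, j):
--     n = len(matriz)
--     v = []
--
--     if i > 0 and j > 0:
--         v.append(matriz[i-1][j-1])
--     if i > 0:
--         v.append(matriz[i-1][j])
--     if i > 0 and j < n-1:
--         v.append(matriz[i-1][j+1])
--
--     if j > 0:
--         v.append(matriz[i][j-1])
--     if j < n-1:
--         v.append(matriz[i][j+1])
--
--     if i < n-1 and j > 0:
--         v.append(matriz[i+1][j-1])
--     if i < n-1: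
--         v.append(matriz[i+1][j])
--     if i < n-1 and j < n-1:
--         v.append(matriz[i+1][j+1])
--
--     return v
--
-- def maior_valor(lista):
--     maior = lista[0]
--     for k in range(1, len(lista)):
--         if lista[k] > maior:
--             maior = lista[k]
--     return maior
--
-- def menor_valor(lista):
--     menor = lista[0]
--     for k in range(1, len(lista)):
--         if lista[k] < menor:
--             menor = lista[k]
--     return menor
--
-- def classificar_pontos(matriz):
--     n = len(matriz)
--     nova = []
--
--     for i in range(n):
--         linha = []
--         for j in range(n):
--             v = vizinhos(matriz, i, j)
--             maior = maior_valor(v)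
--             menor = menor_valor(v)
--
--             if matriz[i][j] > maior:
--                 linha.append('P')
--             elif matriz[i][j] < menor:
--                 linha.append('V')
--             else:
--                 linha.append('N')
--         nova.append(linha)
--     return nova
-- ===== SOURCE B (Python) =====
-- def _ext(cells):
--     # (max, min) of a run of cells, or None if the run is empty
--     return (max(cells), min(cells)) if cells else None
--
--
-- def _merge(a, b):
--     if a is None:
--         return b
--     if b is None:
--         return a
--     return (max(a[0], b[0]), min(a[1], b[1]))
--
--
-- def classificar_pontos(matriz):
--     n = len(matriz)
--     # stage 1: per-row tables of windowed extremes (separable precomputation)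
--     # wext[i][j] = extremes of matriz[i][j-1 .. j+1] clipped to [0, n)
--     # side[i][j] = extremes of the horizontal neighbours matriz[i][j-1], matriz[i][j+1] only
--     wext = [[_ext(row[max(0, j - 1):min(n, j + 2)]) for j in range(n)] for row in matriz]
--     side = [[_merge(_ext(row[max(0, j - 1):j]), _ext(row[j + 1:min(n, j + 2)]))
--              for j in range(n)] for row in matriz]
--     # stage 2: classify each cell by merging three precomputed table entries
--     out = []
--     for i in range(n):
--         line = []
--         for j in range(n):
--             e = _merge(wext[i - 1][j] if i > 0 else None,
--                        _merge(side[i][j], wext[i + 1][j] if i < n - 1 else None))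
--             c = matriz[i][j]
--             line.append('P' if c > e[0] else 'V' if c < e[1] else 'N')
--         out.append(line)
--     return out
-- ===== Notes on version B (the rewrite author's own statement) =====
-- stated objective: alternative
-- what changed: A gathers each cell's neighbour list with eight guarded appends and scans it twice for max and min; B is a staged separable algorithm: it first precomputes per-row tables of horizontally-windowed (max,min) extremes, then classifies each cell by merging just three table entries (row above, own-row side neighbours, row below), never enumerating neighbours per cell.
import Mathlib
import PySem

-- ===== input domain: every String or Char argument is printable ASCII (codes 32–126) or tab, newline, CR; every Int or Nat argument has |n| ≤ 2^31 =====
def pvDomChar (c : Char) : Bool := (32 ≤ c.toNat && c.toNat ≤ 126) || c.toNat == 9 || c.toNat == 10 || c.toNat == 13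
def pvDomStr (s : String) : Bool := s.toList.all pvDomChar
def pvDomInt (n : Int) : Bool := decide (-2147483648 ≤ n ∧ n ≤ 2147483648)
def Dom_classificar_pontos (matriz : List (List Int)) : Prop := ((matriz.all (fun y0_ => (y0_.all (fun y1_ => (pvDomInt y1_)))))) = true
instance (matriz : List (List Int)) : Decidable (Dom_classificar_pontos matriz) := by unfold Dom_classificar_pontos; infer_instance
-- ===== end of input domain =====

-- B replaces A's per-cell neighbour gathering + two scans by a staged separable algorithm:
-- per-row tables of windowed (max,min) extremes precomputed first, then each cell classified
-- by merging three table entries (alternative decomposition, same asymptotic cost).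

-- shared indexing helper matriz[a][b]; the defaults are never reached inside Pre_
def pvIx (matriz : List (List Int)) (a b : Int) : Int :=
  PySem.List.pyGetD (PySem.List.pyGetD matriz a []) b 0

-- ===== PORT A =====
def vizinhos (matriz : List (List Int)) (i j : Int) : List Int :=
  let n : Int := (matriz.length : Int)
  let v : List Int := []
  let v := if i > 0 ∧ j > 0 then v ++ [pvIx matriz (i-1) (j-1)] else v
  let v := if i > 0 then v ++ [pvIx matriz (i-1) j] else v
  let v := if i > 0 ∧ j < n-1 then v ++ [pvIx matriz (i-1) (j+1)] else v
  let v := if j > 0 then v ++ [pvIx matriz i (j-1)] else v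
  let v := if j < n-1 then v ++ [pvIx matriz i (j+1)] else v
  let v := if i < n-1 ∧ j > 0 then v ++ [pvIx matriz (i+1) (j-1)] else v
  let v := if i < n-1 then v ++ [pvIx matriz (i+1) j] else v
  let v := if i < n-1 ∧ j < n-1 then v ++ [pvIx matriz (i+1) (j+1)] else v
  v

def maior_valor (lista : List Int) : Int :=
  (PySem.List.pyRange 1 (lista.length : Int) 1).foldl
    (fun maior k => if PySem.List.pyGetD lista k 0 > maior then PySem.List.pyGetD lista k 0 else maior)
    (PySem.List.pyGetD lista 0 0)

def menor_valor (lista : List Int) : Int :=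
  (PySem.List.pyRange 1 (lista.length : Int) 1).foldl
    (fun menor k => if PySem.List.pyGetD lista k 0 < menor then PySem.List.pyGetD lista k 0 else menor)
    (PySem.List.pyGetD lista 0 0)

def classificar_pontos (matriz : List (List Int)) : List (List String) :=
  let n : Int := (matriz.length : Int)
  (PySem.List.pyRange 0 n 1).foldl (fun nova i =>
    nova ++ [(PySem.List.pyRange 0 n 1).foldl (fun linha j =>
      if pvIx matriz i j > maior_valor (vizinhos matriz i j) then linha ++ ["P"]
      else if pvIx matriz i j < menor_valor (vizinhos matriz i j) then linha ++ ["V"]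
      else linha ++ ["N"]) []]) []

-- ===== PORT B =====
-- _ext(cells): (max(cells), min(cells)) or None; Python's max/min of a nonempty int list
def pvExt (cells : List Int) : Option (Int × Int) :=
  if cells.isEmpty then none
  else some ((PySem.List.max? cells (fun x => x)).getD 0,
             (PySem.List.min? cells (fun x => x)).getD 0)

def pvMerge (a b : Option (Int × Int)) : Option (Int × Int) :=
  match a, b with
  | none, _ => b
  | some p, none => some p
  | some p, some q => some (max p.1 q.1, min p.2 q.2)

-- wext[i][j] = _ext(row[max(0, j-1):min(n, j+2)])
def pvWext (matriz : List (List Int)) (n : Int) : List (List (Option (Int × Int))) :=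
  matriz.map (fun row =>
    (PySem.List.pyRange 0 n 1).map (fun j =>
      pvExt (PySem.List.slice row (some (max 0 (j-1))) (some (min n (j+2))))))

-- side[i][j] = _merge(_ext(row[max(0, j-1):j]), _ext(row[j+1:min(n, j+2)]))
def pvSide (matriz : List (List Int)) (n : Int) : List (List (Option (Int × Int))) :=
  matriz.map (fun row =>
    (PySem.List.pyRange 0 n 1).map (fun j =>
      pvMerge (pvExt (PySem.List.slice row (some (max 0 (j-1))) (some j)))
              (pvExt (PySem.List.slice row (some (j+1)) (some (min n (j+2)))))))

-- table lookup t[a][b]; defaults unreached inside Pre_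
def pvGetT (t : List (List (Option (Int × Int)))) (a b : Int) : Option (Int × Int) :=
  PySem.List.pyGetD (PySem.List.pyGetD t a []) b none

-- e[0] / e[1]; inside Pre_ e is always a tuple (never None)
def classificar_pontos_alt (matriz : List (List Int)) : List (List String) :=
  let n : Int := (matriz.length : Int)
  let wext := pvWext matriz n
  let side := pvSide matriz n
  (PySem.List.pyRange 0 n 1).foldl (fun out i =>
    out ++ [(PySem.List.pyRange 0 n 1).foldl (fun line j =>
      let e := pvMerge (if i > 0 then pvGetT wext (i-1) j else none)
                       (pvMerge (pvGetT side i j)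
                                (if i < n-1 then pvGetT wext (i+1) j else none))
      let c := pvIx matriz i j
      line ++ [if c > (e.getD (0, 0)).1 then "P"
               else if c < (e.getD (0, 0)).2 then "V" else "N"]) []]) []

-- ===== PRECONDITION & SPEC =====
-- Pre_ excludes exactly the inputs where the Python A raises IndexError: a 1×1 matrix
-- (its single cell has no neighbours) and matrices with a row shorter than the number of rows.
def Pre_classificar_pontos (matriz : List (List Int)) : Prop :=
  matriz.length ≠ 1 ∧ ∀ r ∈ matriz, matriz.length ≤ r.length
instance (matriz : List (List Int)) : Decidable (Pre_classificar_pontos matriz) := by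
  unfold Pre_classificar_pontos; infer_instance

def pvWitness_classificar_pontos : List (List Int) := [[1, 2], [3, 4]]

def Spec_classificar_pontos (matriz : List (List Int)) (out : List (List String)) : Prop := out = classificar_pontos_alt matriz
instance (matriz : List (List Int)) (out : List (List String)) : Decidable (Spec_classificar_pontos matriz out) := by unfold Spec_classificar_pontos; infer_instance

-- ===== CLAIM (what is proved, stated in full; the proofs are below) =====
def Claim_equal_classificar_pontos : Prop := ∀ (matriz : List (List Int)), Dom_classificar_pontos matriz → Pre_classificar_pontos matriz → Spec_classificar_pontos matriz (classificar_pontos matriz)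


-- ===== LEMMAS AND PROOFS =====

-- merging the extremes of two runs is the extremes of their concatenation
lemma pvExt_append (A B : List Int) : pvExt (A ++ B) = pvMerge (pvExt A) (pvExt B) := by
  cases A with
  | nil => simp [pvExt, pvMerge]
  | cons a A' =>
    cases B with
    | nil => simp [pvExt, pvMerge]
    | cons b B' =>
      simp only [List.cons_append, pvExt, List.isEmpty_cons, if_neg, Bool.false_eq_true,
        not_false_eq_true, PySem.List.max?_id_cons, PySem.List.min?_id_cons, Option.getD_some,
        pvMerge]
      have hmax : ∀ (t : List Int) (c d : Int), t.foldl max (max c d) = max c (t.foldl max d) :=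
        fun _ _ _ => List.foldl_assoc
      have hmin : ∀ (t : List Int) (c d : Int), t.foldl min (min c d) = min c (t.foldl min d) :=
        fun _ _ _ => List.foldl_assoc
      rw [List.foldl_append, List.foldl_cons, hmax,
          List.foldl_append, List.foldl_cons, hmin]

lemma pvMerge_assoc (a b c : Option (Int × Int)) :
    pvMerge (pvMerge a b) c = pvMerge a (pvMerge b c) := by
  cases a <;> cases b <;> cases c <;> simp [pvMerge, max_assoc, min_assoc]

-- a single element's slice
lemma slice1 (r : List Int) (a : Int) (h0 : 0 ≤ a) (h : a < (r.length : Int)) :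
    PySem.List.slice r (some a) (some (a+1)) = [PySem.List.pyGetD r a 0] := by
  rw [PySem.List.slice_toNat r h0 (by omega),
      PySem.List.pyGetD_eq_getElem r 0 h0 h,
      show (a+1).toNat - a.toNat = 1 by omega,
      List.drop_eq_getElem_cons (by omega)]
  rfl

-- a two-element window
lemma slice2 (r : List Int) (a : Int) (h0 : 0 ≤ a) (h : a + 1 < (r.length : Int)) :
    PySem.List.slice r (some a) (some (a+2)) =
      [PySem.List.pyGetD r a 0, PySem.List.pyGetD r (a+1) 0] := by
  rw [PySem.List.slice_toNat r h0 (by omega),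
      PySem.List.pyGetD_eq_getElem r 0 h0 (by omega),
      PySem.List.pyGetD_eq_getElem r 0 (by omega : (0:Int) ≤ a+1) (by omega),
      show (a+2).toNat - a.toNat = 2 by omega,
      List.drop_eq_getElem_cons (by omega : a.toNat < r.length),
      List.drop_eq_getElem_cons (by omega : a.toNat + 1 < r.length)]
  simp only [List.take_succ_cons, List.take_zero,
    show (a+1).toNat = a.toNat+1 from by omega]

-- a three-element window
lemma slice3 (r : List Int) (a : Int) (h0 : 0 ≤ a) (h : a + 2 < (r.length : Int)) :
    PySem.List.slice r (some a) (some (a+3)) =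
      [PySem.List.pyGetD r a 0, PySem.List.pyGetD r (a+1) 0, PySem.List.pyGetD r (a+2) 0] := by
  rw [PySem.List.slice_toNat r h0 (by omega),
      PySem.List.pyGetD_eq_getElem r 0 h0 (by omega),
      PySem.List.pyGetD_eq_getElem r 0 (by omega : (0:Int) ≤ a+1) (by omega),
      PySem.List.pyGetD_eq_getElem r 0 (by omega : (0:Int) ≤ a+2) (by omega),
      show (a+3).toNat - a.toNat = 3 by omega,
      List.drop_eq_getElem_cons (by omega : a.toNat < r.length),
      List.drop_eq_getElem_cons (by omega : a.toNat + 1 < r.length),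
      List.drop_eq_getElem_cons (by omega : a.toNat + 1 + 1 < r.length)]
  simp only [List.take_succ_cons, List.take_zero,
    show (a+1).toNat = a.toNat+1 from by omega,
    show (a+2).toNat = a.toNat+1+1 from by omega]

-- the clipped horizontal window of a sufficiently long row, as guarded singletons
lemma slice_win (r : List Int) (n j : Int) (hn : 2 ≤ n) (hr : n ≤ (r.length : Int))
    (h0 : 0 ≤ j) (hj : j < n) :
    PySem.List.slice r (some (max 0 (j-1))) (some (min n (j+2))) =
      (if j > 0 then [PySem.List.pyGetD r (j-1) 0] else []) ++
      [PySem.List.pyGetD r j 0] ++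
      (if j < n-1 then [PySem.List.pyGetD r (j+1) 0] else []) := by
  by_cases hjp : j > 0
  · by_cases hjl : j < n-1
    · rw [show max 0 (j-1) = j-1 by omega, show min n (j+2) = (j-1)+3 by omega,
          slice3 r (j-1) (by omega) (by omega), if_pos hjp, if_pos hjl]
      simp only [show j-1+1 = j by omega, show j-1+2 = j+1 by omega]; rfl
    · rw [show max 0 (j-1) = j-1 by omega, show min n (j+2) = (j-1)+2 by omega,
          slice2 r (j-1) (by omega) (by omega), if_pos hjp, if_neg hjl]
      simp only [show j-1+1 = j by omega]; rfl
  · have hj0 : j = 0 := by omega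
    rw [show max 0 (j-1) = j by omega, show min n (j+2) = j+2 by omega,
        slice2 r j h0 (by omega), if_neg hjp, if_pos (by omega : j < n-1)]
    rfl

-- the left / right horizontal-neighbour slices
lemma slice_left (r : List Int) (j : Int) (hr : j < (r.length : Int)) (h0 : 0 ≤ j) :
    PySem.List.slice r (some (max 0 (j-1))) (some j) =
      (if j > 0 then [PySem.List.pyGetD r (j-1) 0] else []) := by
  by_cases hjp : j > 0
  · have h1 := slice1 r (j-1) (by omega) (by omega)
    rw [show j-1+1 = j from by omega] at h1
    rw [show max 0 (j-1) = j-1 by omega, h1, if_pos hjp]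
  · rw [show max 0 (j-1) = j by omega, if_neg hjp,
        PySem.List.slice_toNat r h0 h0]
    simp

lemma slice_right (r : List Int) (n j : Int) (hr : n ≤ (r.length : Int))
    (h0 : 0 ≤ j) (hj : j < n) :
    PySem.List.slice r (some (j+1)) (some (min n (j+2))) =
      (if j < n-1 then [PySem.List.pyGetD r (j+1) 0] else []) := by
  by_cases hjl : j < n-1
  · rw [show min n (j+2) = (j+1)+1 by omega,
        slice1 r (j+1) (by omega) (by omega), if_pos hjl]
  · rw [show min n (j+2) = j+1 by omega, if_neg hjl,
        PySem.List.slice_toNat r (by omega) (by omega)]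
    simp

-- A's hand-written scans compute the components of pvExt on a nonempty list
lemma ext_eq_scans (l : List Int) (h : l ≠ []) :
    pvExt l = some (maior_valor l, menor_valor l) := by
  obtain ⟨x, t, rfl⟩ := List.exists_cons_of_ne_nil h
  unfold maior_valor menor_valor
  rw [PySem.List.foldl_pyRange_pyGetD' (x :: t) 0
        (fun maior y => if y > maior then y else maior) (PySem.List.pyGetD (x :: t) 0 0) (by omega),
      PySem.List.foldl_pyRange_pyGetD' (x :: t) 0
        (fun menor y => if y < menor then y else menor) (PySem.List.pyGetD (x :: t) 0 0) (by omega)]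
  simp only [pvExt, List.isEmpty_cons, Bool.false_eq_true, if_neg, not_false_eq_true,
    PySem.List.max?_id_cons, PySem.List.min?_id_cons, Option.getD_some,
    PySem.List.pyGetD_zero_cons, show (Int.toNat 1) = 1 from rfl, List.drop_succ_cons,
    List.drop_zero]
  have e1 : (fun (m y : Int) => if y > m then y else m) = max := by
    funext m y; by_cases h1 : y > m <;> simp [max_def, h1] <;> omega
  have e2 : (fun (m y : Int) => if y < m then y else m) = min := by
    funext m y; by_cases h1 : y < m <;> simp [min_def, h1]
  rw [e1, e2]

-- A's neighbour list decomposes into the window above, the side singletons, the window below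
set_option maxHeartbeats 1000000 in
lemma viz_decomp (matriz : List (List Int)) (i j : Int) :
    vizinhos matriz i j =
      (if i > 0 then
        (if j > 0 then [pvIx matriz (i-1) (j-1)] else []) ++ [pvIx matriz (i-1) j] ++
        (if j < (matriz.length : Int)-1 then [pvIx matriz (i-1) (j+1)] else []) else []) ++
      ((if j > 0 then [pvIx matriz i (j-1)] else []) ++
       (if j < (matriz.length : Int)-1 then [pvIx matriz i (j+1)] else []) ++
      (if i < (matriz.length : Int)-1 then
        (if j > 0 then [pvIx matriz (i+1) (j-1)] else []) ++ [pvIx matriz (i+1) j] ++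
        (if j < (matriz.length : Int)-1 then [pvIx matriz (i+1) (j+1)] else []) else [])) := by
  by_cases hI : i > 0 <;> by_cases hJ : j > 0 <;>
    by_cases hI2 : i < (matriz.length : Int)-1 <;> by_cases hJ2 : j < (matriz.length : Int)-1 <;>
    simp [vizinhos, hI, hJ, hI2, hJ2]

-- B's merged table entries are the extremes of A's whole neighbour list
lemma e_eq_ext_viz (matriz : List (List Int))
    (hrows : ∀ r ∈ matriz, matriz.length ≤ r.length) (hn : 2 ≤ matriz.length)
    (i j : Int) (hi0 : 0 ≤ i) (hin : i < (matriz.length : Int))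
    (hj0 : 0 ≤ j) (hjn : j < (matriz.length : Int)) :
    pvMerge (if i > 0 then pvGetT (pvWext matriz (matriz.length : Int)) (i-1) j else none)
            (pvMerge (pvGetT (pvSide matriz (matriz.length : Int)) i j)
                     (if i < (matriz.length : Int)-1 then pvGetT (pvWext matriz (matriz.length : Int)) (i+1) j else none))
    = pvExt (vizinhos matriz i j) := by
  have hn2 : (2:Int) ≤ (matriz.length : Int) := by exact_mod_cast hn
  have hlen : ∀ (k : Int), 0 ≤ k → k < (matriz.length : Int) → k.toNat < matriz.length := by
    intro k h0 h1; omega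
  have hrowlen : ∀ (k : Int) (h0 : 0 ≤ k) (h1 : k < (matriz.length : Int)),
      (matriz.length : Int) ≤ ((matriz[k.toNat]'(hlen k h0 h1)).length : Int) := by
    intro k h0 h1
    exact_mod_cast hrows (matriz[k.toNat]'(hlen k h0 h1)) (List.getElem_mem _)
  have hIx : ∀ (k : Int) (h0 : 0 ≤ k) (h1 : k < (matriz.length : Int)) (b : Int),
      pvIx matriz k b = PySem.List.pyGetD (matriz[k.toNat]'(hlen k h0 h1)) b 0 := by
    intro k h0 h1 b
    unfold pvIx
    rw [PySem.List.pyGetD_eq_getElem matriz [] h0 h1]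
  have hWlook : ∀ (k : Int) (h0 : 0 ≤ k) (h1 : k < (matriz.length : Int)),
      pvGetT (pvWext matriz (matriz.length : Int)) k j =
        pvExt (PySem.List.slice (matriz[k.toNat]'(hlen k h0 h1))
          (some (max 0 (j-1))) (some (min (matriz.length : Int) (j+2)))) := by
    intro k h0 h1
    unfold pvGetT pvWext
    rw [PySem.List.pyGetD_eq_getElem _ _ h0 (by simpa using h1), List.getElem_map,
        PySem.List.pyGetD_map_pyRange_of_nonneg _ _ _ _ hj0 hjn]
  have hSlook : pvGetT (pvSide matriz (matriz.length : Int)) i j =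
      pvMerge
        (pvExt (PySem.List.slice (matriz[i.toNat]'(hlen i hi0 hin)) (some (max 0 (j-1))) (some j)))
        (pvExt (PySem.List.slice (matriz[i.toNat]'(hlen i hi0 hin)) (some (j+1)) (some (min (matriz.length : Int) (j+2))))) := by
    unfold pvGetT pvSide
    rw [PySem.List.pyGetD_eq_getElem _ _ hi0 (by simpa using hin), List.getElem_map,
        PySem.List.pyGetD_map_pyRange_of_nonneg _ _ _ _ hj0 hjn]
  rw [hSlook, slice_left _ _ (by have := hrowlen i hi0 hin; omega) hj0,
      slice_right _ _ _ (hrowlen i hi0 hin) hj0 hjn,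
      viz_decomp matriz i j, ← hIx i hi0 hin (j-1), ← hIx i hi0 hin (j+1)]
  have pvMerge_none_right : ∀ (a : Option (Int × Int)), pvMerge a none = a := by
    intro a; cases a <;> rfl
  have pvMerge_none_left : ∀ (a : Option (Int × Int)), pvMerge none a = a := fun _ => rfl
  by_cases hI : i > 0 <;> by_cases hI2 : i < (matriz.length : Int)-1 <;>
    simp only [hI, hI2, if_true, if_false]
  · rw [hWlook (i-1) (by omega) (by omega),
        slice_win _ _ _ hn2 (hrowlen (i-1) (by omega) (by omega)) hj0 hjn,
        hWlook (i+1) (by omega) (by omega),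
        slice_win _ _ _ hn2 (hrowlen (i+1) (by omega) (by omega)) hj0 hjn,
        ← hIx (i-1) (by omega) (by omega) (j-1), ← hIx (i-1) (by omega) (by omega) j,
        ← hIx (i-1) (by omega) (by omega) (j+1),
        ← hIx (i+1) (by omega) (by omega) (j-1), ← hIx (i+1) (by omega) (by omega) j,
        ← hIx (i+1) (by omega) (by omega) (j+1)]
    simp only [pvExt_append, pvMerge_assoc, List.append_assoc]
  · rw [hWlook (i-1) (by omega) (by omega),
        slice_win _ _ _ hn2 (hrowlen (i-1) (by omega) (by omega)) hj0 hjn,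
        ← hIx (i-1) (by omega) (by omega) (j-1), ← hIx (i-1) (by omega) (by omega) j,
        ← hIx (i-1) (by omega) (by omega) (j+1)]
    simp only [pvExt_append, pvMerge_assoc, List.append_assoc, List.append_nil,
      pvMerge_none_right]
  · rw [hWlook (i+1) (by omega) (by omega),
        slice_win _ _ _ hn2 (hrowlen (i+1) (by omega) (by omega)) hj0 hjn,
        ← hIx (i+1) (by omega) (by omega) (j-1), ← hIx (i+1) (by omega) (by omega) j,
        ← hIx (i+1) (by omega) (by omega) (j+1)]
    simp only [pvExt_append, pvMerge_assoc, List.append_assoc, List.nil_append,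
      pvMerge_none_left]
  · omega

-- A cell inside a matrix of side ≥ 2 has at least one neighbour
lemma viz_ne_nil (matriz : List (List Int)) (hn : 2 ≤ matriz.length)
    (i j : Int) (hj0 : 0 ≤ j) (hjn : j < (matriz.length : Int)) :
    vizinhos matriz i j ≠ [] := by
  have hn2 : (2:Int) ≤ (matriz.length : Int) := by exact_mod_cast hn
  rw [viz_decomp matriz i j]
  by_cases hjp : j > 0 <;>
    simp [hjp, show ¬ j > 0 → j < (matriz.length : Int)-1 from by omega]

-- the two per-cell classifications agree
lemma cell_eq (matriz : List (List Int))
    (hrows : ∀ r ∈ matriz, matriz.length ≤ r.length) (hn : 2 ≤ matriz.length)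
    (i j : Int) (hi0 : 0 ≤ i) (hin : i < (matriz.length : Int))
    (hj0 : 0 ≤ j) (hjn : j < (matriz.length : Int)) :
    (let e := pvMerge (if i > 0 then pvGetT (pvWext matriz (matriz.length : Int)) (i-1) j else none)
                      (pvMerge (pvGetT (pvSide matriz (matriz.length : Int)) i j)
                               (if i < (matriz.length : Int)-1 then pvGetT (pvWext matriz (matriz.length : Int)) (i+1) j else none))
     if pvIx matriz i j > (e.getD (0, 0)).1 then "P"
     else if pvIx matriz i j < (e.getD (0, 0)).2 then "V" else "N")
    = (if pvIx matriz i j > maior_valor (vizinhos matriz i j) then "P"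
       else if pvIx matriz i j < menor_valor (vizinhos matriz i j) then "V" else "N") := by
  simp only [e_eq_ext_viz matriz hrows hn i j hi0 hin hj0 hjn,
    ext_eq_scans (vizinhos matriz i j) (viz_ne_nil matriz hn i j hj0 hjn),
    Option.getD_some]

-- ===== VERDICT (by name: the statement is the Claim_ definition above) =====
-- the two ports agree on every input admitted by Pre_
theorem classificar_pontos_eq_alt (matriz : List (List Int))
    (hne1 : matriz.length ≠ 1) (hrows : ∀ r ∈ matriz, matriz.length ≤ r.length) :
    classificar_pontos matriz = classificar_pontos_alt matriz := by
  rcases Nat.eq_zero_or_pos matriz.length with h0 | hpos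
  · rw [List.length_eq_zero_iff.mp h0]; rfl
  · have hn : 2 ≤ matriz.length := by omega
    simp only [classificar_pontos, classificar_pontos_alt]
    have hbr : ∀ i : Int,
        (fun (linha : List String) (j : Int) =>
          if pvIx matriz i j > maior_valor (vizinhos matriz i j) then linha ++ ["P"]
          else if pvIx matriz i j < menor_valor (vizinhos matriz i j) then linha ++ ["V"]
          else linha ++ ["N"])
        = fun (linha : List String) (j : Int) => linha ++
            [if pvIx matriz i j > maior_valor (vizinhos matriz i j) then "P"
             else if pvIx matriz i j < menor_valor (vizinhos matriz i j) then "V" else "N"] := by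
      intro i; funext linha j; split_ifs <;> rfl
    simp only [hbr, PySem.List.foldl_append_singleton_eq_map, List.nil_append]
    refine List.map_congr_left (fun i hi => ?_)
    obtain ⟨hi0, hin⟩ := PySem.List.mem_pyRange_one.mp hi
    refine List.map_congr_left (fun j hj => ?_)
    obtain ⟨hj0, hjn⟩ := PySem.List.mem_pyRange_one.mp hj
    exact (cell_eq matriz hrows hn i j hi0 hin hj0 hjn).symm

theorem classificar_pontos_spec : Claim_equal_classificar_pontos := by
  intro matriz _ hpre
  exact classificar_pontos_eq_alt matriz hpre.1 hpre.2
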